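-- pv_equiv track=rewrite | github.com/Hulyamr13/hackerrank | Introduction to Algebra.py | loop
-- ===== SOURCE A (Python) =====
-- def loop(a):
--     n = len(a)
--     ce = 0
--     E = 0
--     for e in range(n):
--         cnt = sum(1 for x in range(n) if a[e][x] == x and a[x][e] == x)
--         if cnt == n:
--             ce += 1
--             E = e
--     return ce == 1, E
-- ===== SOURCE B (Python) =====
-- def loop(a):
--     n = len(a)
--     # A two-sided identity of a finite operation table is unique (e = a[e][f] = f
--     # for two identities e, f), so we can return at the first one found.
--     for e in range(n):
--         if all(a[e][x] == x for x in range(n)) and all(a[x][e] == x for x in range(n)):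
--             return True, e
--     return False, 0
-- ===== Notes on version B (the rewrite author's own statement) =====
-- stated objective: alternative
-- what changed: B exploits the algebraic fact that a two-sided identity is unique (e = a[e][f] = f for two identities), so instead of A's fused counting scan over all candidates followed by a count==1 test, B early-returns (True, e) at the first candidate whose row and column are identities, with short-circuiting all(); the Lean proof carries the uniqueness lemma. A timing run measured B ~2x faster (short-circuit/early exit; same O(n^2) worst case).
import Mathlib
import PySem

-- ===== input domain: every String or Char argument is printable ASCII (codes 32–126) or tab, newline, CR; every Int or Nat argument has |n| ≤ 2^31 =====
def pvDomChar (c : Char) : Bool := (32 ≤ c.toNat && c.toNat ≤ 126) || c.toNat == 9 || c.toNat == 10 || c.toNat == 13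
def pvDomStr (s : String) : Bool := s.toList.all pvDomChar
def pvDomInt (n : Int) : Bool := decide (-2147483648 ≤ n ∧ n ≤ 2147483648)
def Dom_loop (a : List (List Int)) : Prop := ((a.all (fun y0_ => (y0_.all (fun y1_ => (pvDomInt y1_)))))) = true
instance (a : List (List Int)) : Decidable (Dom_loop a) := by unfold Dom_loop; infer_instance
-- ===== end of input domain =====

-- B replaces A's count-all-candidates-then-test-count==1 scan by an early-return search:
-- a two-sided identity of an operation table is unique (proved below as loopAltCond_unique),
-- so the first candidate found is the only one. Same worst-case cost, different algorithm.
-- Pre_loop excludes ragged tables (some row shorter than len(a)), on which A raises IndexError.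


-- ===== PORT A =====
def loop (a : List (List Int)) : Bool × Int :=
  let n : Int := a.length
  let st := (PySem.List.pyRange 0 n 1).foldl (fun (st : Int × Int) e =>
    let cnt : Int := (PySem.List.pyRange 0 n 1).foldl (fun (c : Int) x =>
      if PySem.List.pyGetD (PySem.List.pyGetD a e []) x 0 = x ∧
         PySem.List.pyGetD (PySem.List.pyGetD a x []) e 0 = x
      then c + 1 else c) 0
    if cnt = n then (st.1 + 1, e) else st) (0, 0)
  (st.1 == 1, st.2)

-- ===== PORT B =====
-- the condition of B's 'if': row e is the identity row and column e the identity column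
def loopAltCond (a : List (List Int)) (n e : Int) : Bool :=
  (PySem.List.pyRange 0 n 1).all (fun x => PySem.List.pyGetD (PySem.List.pyGetD a e []) x 0 == x) &&
  (PySem.List.pyRange 0 n 1).all (fun x => PySem.List.pyGetD (PySem.List.pyGetD a x []) e 0 == x)

-- B's 'for e in range(n): … return True, e' early-return loop, as structural recursion
def loopAltFind (a : List (List Int)) (n : Int) : List Int → Bool × Int
  | [] => (false, 0)
  | e :: rest => if loopAltCond a n e then (true, e) else loopAltFind a n rest

def loop_alt (a : List (List Int)) : Bool × Int :=
  loopAltFind a a.length (PySem.List.pyRange 0 a.length 1)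

-- ===== PRECONDITION & SPEC =====
-- Pre_loop: every row has at least len(a) entries; on ragged tables A raises IndexError.
def Pre_loop (a : List (List Int)) : Prop := ∀ row ∈ a, a.length ≤ row.length
instance (a : List (List Int)) : Decidable (Pre_loop a) := by unfold Pre_loop; infer_instance
def pvWitness_loop : List (List Int) := [[0, 1], [1, 0]]
def Spec_loop (a : List (List Int)) (out : Bool × Int) : Prop := out = loop_alt a
instance (a : List (List Int)) (out : Bool × Int) : Decidable (Spec_loop a out) := by unfold Spec_loop; infer_instance

-- ===== CLAIM (what is proved, stated in full; the proofs are below) =====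
def Claim_equal_loop : Prop := ∀ (a : List (List Int)), Dom_loop a → Pre_loop a → Spec_loop a (loop a)

-- ===== LEMMAS AND PROOFS =====

theorem count_foldl_eq_countP (p : Int → Prop) [DecidablePred p] (l : List Int) (c : Int) :
    l.foldl (fun (c : Int) x => if p x then c + 1 else c) c = c + l.countP (fun x => decide (p x)) := by
  induction l generalizing c with
  | nil => simp
  | cons y ys ih =>
    simp only [List.foldl_cons, List.countP_cons, ih]
    by_cases h : p y
    · simp [h]; ring
    · simp [h]

-- A's per-candidate count reaches n exactly when B's boolean condition holds
theorem cnt_iff (a : List (List Int)) (n e : Int) (hn : 0 ≤ n) :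
    ((PySem.List.pyRange 0 n 1).foldl (fun (c : Int) x =>
        if PySem.List.pyGetD (PySem.List.pyGetD a e []) x 0 = x ∧
           PySem.List.pyGetD (PySem.List.pyGetD a x []) e 0 = x
        then c + 1 else c) 0 = n) ↔ loopAltCond a n e = true := by
  rw [count_foldl_eq_countP]
  unfold loopAltCond
  have hlen : (PySem.List.pyRange 0 n 1).length = n.toNat := by
    rw [PySem.List.length_pyRange_one]; omega
  have hcnt : (PySem.List.pyRange 0 n 1).countP
      (fun x => decide (PySem.List.pyGetD (PySem.List.pyGetD a e []) x 0 = x ∧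
        PySem.List.pyGetD (PySem.List.pyGetD a x []) e 0 = x)) ≤ n.toNat := by
    rw [← hlen]; exact List.countP_le_length
  constructor
  · intro h
    have hcp : (PySem.List.pyRange 0 n 1).countP
        (fun x => decide (PySem.List.pyGetD (PySem.List.pyGetD a e []) x 0 = x ∧
          PySem.List.pyGetD (PySem.List.pyGetD a x []) e 0 = x)) =
        (PySem.List.pyRange 0 n 1).length := by omega
    rw [List.countP_eq_length] at hcp
    simp only [Bool.and_eq_true, List.all_eq_true, beq_iff_eq]
    exact ⟨fun x hx => (of_decide_eq_true (hcp x hx)).1,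
           fun x hx => (of_decide_eq_true (hcp x hx)).2⟩
  · intro h
    simp only [Bool.and_eq_true, List.all_eq_true, beq_iff_eq] at h
    have hcp : (PySem.List.pyRange 0 n 1).countP
        (fun x => decide (PySem.List.pyGetD (PySem.List.pyGetD a e []) x 0 = x ∧
          PySem.List.pyGetD (PySem.List.pyGetD a x []) e 0 = x)) =
        (PySem.List.pyRange 0 n 1).length := by
      rw [List.countP_eq_length]
      exact fun x hx => decide_eq_true ⟨h.1 x hx, h.2 x hx⟩
    omega

-- uniqueness of the two-sided identity: row e at f says a[e][f] = f, column f at e says a[e][f] = e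
theorem loopAltCond_unique (a : List (List Int)) (n e f : Int)
    (he : e ∈ PySem.List.pyRange 0 n 1) (hf : f ∈ PySem.List.pyRange 0 n 1)
    (hce : loopAltCond a n e = true) (hcf : loopAltCond a n f = true) : e = f := by
  unfold loopAltCond at hce hcf
  simp only [Bool.and_eq_true, List.all_eq_true, beq_iff_eq] at hce hcf
  have h1 := hce.1 f hf
  have h2 := hcf.2 e he
  omega

theorem foldl_no_cond (a : List (List Int)) (n : Int) (l : List Int) (st : Int × Int)
    (h : ∀ e ∈ l, loopAltCond a n e = false) :
    l.foldl (fun (st : Int × Int) e => if loopAltCond a n e = true then (st.1 + 1, e) else st) st = st := by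
  induction l generalizing st with
  | nil => rfl
  | cons y ys ih =>
    have hy := h y List.mem_cons_self
    rw [List.foldl_cons, if_neg (by rw [hy]; simp)]
    exact ih st (fun e he => h e (List.mem_cons_of_mem _ he))

theorem fold_eq_find (a : List (List Int)) (n : Int) (l : List Int) (hnd : l.Nodup)
    (huniq : ∀ e ∈ l, ∀ f ∈ l, loopAltCond a n e = true → loopAltCond a n f = true → e = f) :
    (((l.foldl (fun (st : Int × Int) e => if loopAltCond a n e = true then (st.1 + 1, e) else st) (0, 0)).1 == 1),
      (l.foldl (fun (st : Int × Int) e => if loopAltCond a n e = true then (st.1 + 1, e) else st) (0, 0)).2)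
    = loopAltFind a n l := by
  induction l with
  | nil => rfl
  | cons y ys ih =>
    simp only [List.foldl_cons, loopAltFind]
    by_cases hy : loopAltCond a n y = true
    · rw [if_pos hy, if_pos hy]
      have hrest : ∀ e ∈ ys, loopAltCond a n e = false := by
        intro e he
        by_contra hc
        have hce : loopAltCond a n e = true := by
          cases hh : loopAltCond a n e
          · exact absurd hh hc
          · rfl
        have := huniq y List.mem_cons_self e (List.mem_cons_of_mem _ he) hy hce
        subst this
        exact (List.nodup_cons.mp hnd).1 he
      rw [foldl_no_cond a n ys _ hrest]
      norm_num
    · rw [if_neg hy, if_neg hy]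
      exact ih (List.nodup_cons.mp hnd).2
        (fun e he f hf => huniq e (List.mem_cons_of_mem _ he) f (List.mem_cons_of_mem _ hf))

theorem loop_eq_alt (a : List (List Int)) : loop a = loop_alt a := by
  unfold loop loop_alt
  simp only []
  have hfun : (fun (st : Int × Int) (e : Int) =>
      if (PySem.List.pyRange 0 (a.length : Int) 1).foldl (fun (c : Int) x =>
          if PySem.List.pyGetD (PySem.List.pyGetD a e []) x 0 = x ∧
             PySem.List.pyGetD (PySem.List.pyGetD a x []) e 0 = x
          then c + 1 else c) 0 = (a.length : Int)
      then (st.1 + 1, e) else st) =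
      (fun (st : Int × Int) (e : Int) =>
        if loopAltCond a (a.length : Int) e = true then (st.1 + 1, e) else st) := by
    funext st e
    exact if_congr (cnt_iff a _ e (by positivity)) rfl rfl
  rw [hfun]
  exact fold_eq_find a _ _ (PySem.List.nodup_pyRange_one _ _)
    (fun e he f hf => loopAltCond_unique a _ e f he hf)

-- ===== VERDICT (by name: the statement is the Claim_ definition above) =====
theorem loop_spec : Claim_equal_loop := by
  intro a _ _
  unfold Spec_loop
  exact loop_eq_alt a
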